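-- pv_equiv track=rewrite | github.com/HetorusNL/advent-of-code | 2024/12/solution/part1.py | process_fill
-- ===== SOURCE A (Python) =====
-- def process_fill(plant_dict: dict[int, dict[int, bool]]) -> int:
--     area: int = 0
--     fence: int = 0
--     for x, row_y in plant_dict.items():
--         for y in row_y.keys():
--             # add one to the area for every plot
--             area += 1
--             # test for every edge if there is a same plant
--             if not plant_dict.get(x - 1, {}).get(y):
--                 fence += 1
--             if not plant_dict.get(x + 1, {}).get(y):
--                 fence += 1
--             if not plant_dict.get(x, {}).get(y - 1):
--                 fence += 1
--             if not plant_dict.get(x, {}).get(y + 1):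
--                 fence += 1
--     return area * fence
-- ===== SOURCE B (Python) =====
-- def process_fill(plant_dict: dict[int, dict[int, bool]]) -> int:
--     area = sum(len(row) for row in plant_dict.values())
--     present = {(x, y) for x, row in plant_dict.items() for y in row}
--     truthy = {(x, y) for x, row in plant_dict.items() for y, v in row.items() if v}
--     s = 0
--     for x, y in truthy:
--         for n in ((x - 1, y), (x + 1, y), (x, y - 1), (x, y + 1)):
--             if n in present:
--                 s += 1
--     return area * (4 * area - s)
-- ===== Notes on version B (the rewrite author's own statement) =====
-- stated objective: alternative
-- what changed: Instead of accumulating area and a per-cell 4-way fence test in one nested loop, B computes the area as a sum of row lengths, builds a set of present cells and a set of truthy cells, counts present neighbors of truthy cells (S), and returns area*(4*area - S) by double counting.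
import Mathlib
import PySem

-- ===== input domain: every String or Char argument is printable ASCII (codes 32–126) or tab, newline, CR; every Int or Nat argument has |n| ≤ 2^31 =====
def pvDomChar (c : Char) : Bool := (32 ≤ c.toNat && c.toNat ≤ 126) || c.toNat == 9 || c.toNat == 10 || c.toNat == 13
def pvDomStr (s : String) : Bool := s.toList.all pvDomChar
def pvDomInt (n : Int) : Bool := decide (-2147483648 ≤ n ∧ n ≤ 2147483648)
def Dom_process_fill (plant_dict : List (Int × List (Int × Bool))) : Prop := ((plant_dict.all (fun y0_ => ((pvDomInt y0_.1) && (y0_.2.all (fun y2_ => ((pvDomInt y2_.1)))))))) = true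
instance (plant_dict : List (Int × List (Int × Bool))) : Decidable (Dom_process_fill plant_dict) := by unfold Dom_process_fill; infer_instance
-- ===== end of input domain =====

-- B replaces A's per-cell 4-way fence test by double counting: fence = 4*area minus the
-- number of (truthy cell, present neighbor) adjacencies; same value, alternative algorithm.

-- ===== PORT A =====
-- Python truthiness of row.get(y): None and False are falsy, True is truthy
def pvTruthy (o : Option Bool) : Bool := o.getD false

-- plant_dict.get(x, {}).get(y)  (first-match lookup, as a Python dict built from the list)
def pvGet2 (plant_dict : List (Int × List (Int × Bool))) (x y : Int) : Option Bool :=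
  (PySem.Dict.mk ((PySem.Dict.mk plant_dict).getD x [])).get? y

def process_fill (plant_dict : List (Int × List (Int × Bool))) : Int :=
  let r := plant_dict.foldl (fun (st : Int × Int) xrow =>
    xrow.2.foldl (fun (st : Int × Int) yv =>
      let x := xrow.1
      let y := yv.1
      let area := st.1 + 1
      let f1 := if !(pvTruthy (pvGet2 plant_dict (x - 1) y)) then st.2 + 1 else st.2
      let f2 := if !(pvTruthy (pvGet2 plant_dict (x + 1) y)) then f1 + 1 else f1
      let f3 := if !(pvTruthy (pvGet2 plant_dict x (y - 1))) then f2 + 1 else f2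
      let f4 := if !(pvTruthy (pvGet2 plant_dict x (y + 1))) then f3 + 1 else f3
      (area, f4)) st) (0, 0)
  r.1 * r.2

-- ===== PORT B =====
def process_fill_alt (plant_dict : List (Int × List (Int × Bool))) : Int :=
  let area : Int := (plant_dict.map (fun r => (r.2.length : Int))).sum
  let present : PySem.Set (Int × Int) :=
    PySem.Set.ofList (plant_dict.flatMap (fun r => r.2.map (fun yv => (r.1, yv.1))))
  let truthy : PySem.Set (Int × Int) :=
    PySem.Set.ofList (plant_dict.flatMap (fun r => (r.2.filter (fun yv => yv.2)).map (fun yv => (r.1, yv.1))))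
  let s : Int := truthy.foldl (fun acc q =>
      acc + (if (q.1 - 1, q.2) ∈ present then 1 else 0)
          + (if (q.1 + 1, q.2) ∈ present then 1 else 0)
          + (if (q.1, q.2 - 1) ∈ present then 1 else 0)
          + (if (q.1, q.2 + 1) ∈ present then 1 else 0)) 0
  area * (4 * area - s)

-- ===== PRECONDITION & SPEC =====
-- Pre_ excludes association lists with duplicate outer or inner keys: those are not the
-- image of any Python dict (a Python dict collapses duplicates before A ever runs).
def Pre_process_fill (plant_dict : List (Int × List (Int × Bool))) : Prop :=
  (plant_dict.map (·.1)).Nodup ∧ ∀ r ∈ plant_dict, (r.2.map (·.1)).Nodup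
instance (plant_dict : List (Int × List (Int × Bool))) : Decidable (Pre_process_fill plant_dict) := by unfold Pre_process_fill; infer_instance

def pvWitness_process_fill : (List (Int × List (Int × Bool))) :=
  [(0, [(0, true), (1, true)]), (1, [(0, false)])]

def Spec_process_fill (plant_dict : List (Int × List (Int × Bool))) (out : Int) : Prop := out = process_fill_alt plant_dict
instance (plant_dict : List (Int × List (Int × Bool))) (out : Int) : Decidable (Spec_process_fill plant_dict out) := by unfold Spec_process_fill; infer_instance

-- ===== CLAIM (what is proved, stated in full; the proofs are below) =====
def Claim_equal_process_fill : Prop := ∀ (plant_dict : List (Int × List (Int × Bool))), Dom_process_fill plant_dict → Pre_process_fill plant_dict → Spec_process_fill plant_dict (process_fill plant_dict)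

-- ===== LEMMAS AND PROOFS =====

def pvCells (pd : List (Int × List (Int × Bool))) : List (Int × Int) :=
  pd.flatMap (fun r => r.2.map (fun yv => (r.1, yv.1)))
def pvTcells (pd : List (Int × List (Int × Bool))) : List (Int × Int) :=
  pd.flatMap (fun r => (r.2.filter (fun yv => yv.2)).map (fun yv => (r.1, yv.1)))

lemma mem_pvCells (pd : List (Int × List (Int × Bool))) (x y : Int) :
    (x, y) ∈ pvCells pd ↔ ∃ r ∈ pd, r.1 = x ∧ ∃ v, (y, v) ∈ r.2 := by
  simp only [pvCells, List.mem_flatMap, List.mem_map]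
  constructor
  · rintro ⟨r, hr, yv, hyv, h⟩
    obtain ⟨h1, h2⟩ := Prod.mk.injEq _ _ _ _ ▸ h
    exact ⟨r, hr, h1, yv.2, by rw [← h2]; exact hyv⟩
  · rintro ⟨r, hr, hx, v, hv⟩
    exact ⟨r, hr, (y, v), hv, by simp [hx]⟩

lemma mem_pvTcells (pd : List (Int × List (Int × Bool))) (x y : Int) :
    (x, y) ∈ pvTcells pd ↔ ∃ r ∈ pd, r.1 = x ∧ (y, true) ∈ r.2 := by
  simp only [pvTcells, List.mem_flatMap, List.mem_map, List.mem_filter]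
  constructor
  · rintro ⟨r, hr, yv, ⟨hyv, htr⟩, h⟩
    obtain ⟨h1, h2⟩ := Prod.mk.injEq _ _ _ _ ▸ h
    refine ⟨r, hr, h1, ?_⟩
    have : yv = (y, true) := by cases yv; simp_all
    exact this ▸ hyv
  · rintro ⟨r, hr, hx, hv⟩
    exact ⟨r, hr, (y, true), ⟨hv, rfl⟩, by simp [hx]⟩

lemma assoc_get?_eq_none_iff {ν : Type} (l : List (Int × ν)) (x : Int) :
    (PySem.Dict.mk l).get? x = none ↔ x ∉ l.map (·.1) := by
  induction l with
  | nil => simp [PySem.Dict.get?]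
  | cons r rest ih =>
    obtain ⟨k, v⟩ := r
    rw [PySem.Dict.get?_mk_cons]
    by_cases hk : k = x
    · subst hk; simp
    · have hb : (k == x) = false := by simp [hk]
      simp only [hb, Bool.false_eq_true, if_false, ih, List.map_cons, List.mem_cons]
      simp [(Ne.symm hk : x ≠ k)]

lemma assoc_get?_eq_some_iff {ν : Type} (l : List (Int × ν))
    (h : (l.map (·.1)).Nodup) (x : Int) (v : ν) :
    (PySem.Dict.mk l).get? x = some v ↔ (x, v) ∈ l := by
  induction l with
  | nil => simp [PySem.Dict.get?]
  | cons r rest ih =>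
    obtain ⟨k, w⟩ := r
    simp only [List.map_cons, List.nodup_cons] at h
    rw [PySem.Dict.get?_mk_cons]
    by_cases hk : k = x
    · subst hk
      simp only [beq_self_eq_true, if_true, List.mem_cons]
      constructor
      · intro h'
        exact Or.inl (by rw [Option.some.injEq] at h'; rw [h'])
      · rintro (h' | h')
        · obtain ⟨h1, h2⟩ := Prod.mk.injEq _ _ _ _ ▸ h'
          rw [h2]
        · exact absurd (List.mem_map.mpr ⟨_, h', rfl⟩) h.1
    · have hb : (k == x) = false := by simp [hk]
      simp only [hb, Bool.false_eq_true, if_false, ih h.2, List.mem_cons]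
      constructor
      · exact fun h' => Or.inr h'
      · rintro (h' | h')
        · exact absurd (Prod.mk.injEq _ _ _ _ ▸ h').1.symm hk
        · exact h'

lemma pvTruthy_eq_true_iff (o : Option Bool) : pvTruthy o = true ↔ o = some true := by
  cases o with
  | none => simp [pvTruthy]
  | some b => cases b <;> simp [pvTruthy]

lemma pvGet2_some_true_iff (pd : List (Int × List (Int × Bool)))
    (h1 : (pd.map (·.1)).Nodup) (h2 : ∀ r ∈ pd, (r.2.map (·.1)).Nodup) (x y : Int) :
    pvGet2 pd x y = some true ↔ (x, y) ∈ pvTcells pd := by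
  have hgetD : (PySem.Dict.mk pd).getD x [] = ((PySem.Dict.mk pd).get? x).getD [] := by
    simp [PySem.Dict.getD]
  rw [pvGet2, hgetD, mem_pvTcells]
  cases hx : (PySem.Dict.mk pd).get? x with
  | none =>
    have hnk : x ∉ pd.map (·.1) := (assoc_get?_eq_none_iff pd x).mp hx
    simp only [Option.getD_none]
    constructor
    · intro h'; exact absurd h' (by simp [PySem.Dict.get?])
    · rintro ⟨r, hr, hrx, -⟩
      exact absurd (List.mem_map.mpr ⟨r, hr, hrx⟩) hnk
  | some row =>
    have hmem : (x, row) ∈ pd := (assoc_get?_eq_some_iff pd h1 x row).mp hx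
    have hrownd : (row.map (·.1)).Nodup := h2 (x, row) hmem
    simp only [Option.getD_some]
    rw [assoc_get?_eq_some_iff row hrownd y true]
    constructor
    · intro h'; exact ⟨(x, row), hmem, rfl, h'⟩
    · rintro ⟨r, hr, hrx, hy⟩
      have : (PySem.Dict.mk pd).get? x = some r.2 := by
        rw [assoc_get?_eq_some_iff pd h1 x r.2]
        have : r = (x, r.2) := by cases r; simp_all
        rw [← this]; exact hr
      rw [hx] at this
      rw [Option.some.injEq] at this
      rw [this]; exact hy

-- per-cell fence contribution of A
def pvCf (pd : List (Int × List (Int × Bool))) (p : Int × Int) : Int :=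
  (if !(pvTruthy (pvGet2 pd (p.1 - 1) p.2)) then 1 else 0)
  + (if !(pvTruthy (pvGet2 pd (p.1 + 1) p.2)) then 1 else 0)
  + (if !(pvTruthy (pvGet2 pd p.1 (p.2 - 1))) then 1 else 0)
  + (if !(pvTruthy (pvGet2 pd p.1 (p.2 + 1))) then 1 else 0)

lemma A_inner_fold (pd : List (Int × List (Int × Bool))) (x : Int) :
    ∀ (row : List (Int × Bool)) (a f : Int),
    row.foldl (fun (st : Int × Int) yv =>
      (st.1 + 1,
        let f1 := if !(pvTruthy (pvGet2 pd (x - 1) yv.1)) then st.2 + 1 else st.2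
        let f2 := if !(pvTruthy (pvGet2 pd (x + 1) yv.1)) then f1 + 1 else f1
        let f3 := if !(pvTruthy (pvGet2 pd x (yv.1 - 1))) then f2 + 1 else f2
        if !(pvTruthy (pvGet2 pd x (yv.1 + 1))) then f3 + 1 else f3)) (a, f)
      = (a + row.length, f + (row.map (fun yv => pvCf pd (x, yv.1))).sum) := by
  intro row
  induction row with
  | nil => intro a f; simp
  | cons yv rest ih =>
    intro a f
    rw [List.foldl_cons, List.map_cons, List.sum_cons, ih]
    refine Prod.ext ?_ ?_
    · simp; omega
    · simp only [pvCf]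
      split_ifs <;> (simp; try omega)

lemma A_outer_fold (pd : List (Int × List (Int × Bool))) :
    ∀ (l : List (Int × List (Int × Bool))) (a f : Int),
    l.foldl (fun (st : Int × Int) xrow =>
      xrow.2.foldl (fun (st : Int × Int) yv =>
        (st.1 + 1,
          let f1 := if !(pvTruthy (pvGet2 pd (xrow.1 - 1) yv.1)) then st.2 + 1 else st.2
          let f2 := if !(pvTruthy (pvGet2 pd (xrow.1 + 1) yv.1)) then f1 + 1 else f1
          let f3 := if !(pvTruthy (pvGet2 pd xrow.1 (yv.1 - 1))) then f2 + 1 else f2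
          if !(pvTruthy (pvGet2 pd xrow.1 (yv.1 + 1))) then f3 + 1 else f3)) st) (a, f)
      = (a + (pvCells l).length, f + ((pvCells l).map (pvCf pd)).sum) := by
  intro l
  induction l with
  | nil => intro a f; simp [pvCells]
  | cons r rest ih =>
    intro a f
    rw [List.foldl_cons, A_inner_fold pd r.1 r.2 a f, ih]
    have hc : pvCells (r :: rest) = r.2.map (fun yv => (r.1, yv.1)) ++ pvCells rest := by
      simp [pvCells]
    rw [hc]
    refine Prod.ext ?_ ?_
    · simp; omega
    · simp only [List.map_append, List.sum_append, List.map_map]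
      have : (r.2.map (fun yv => pvCf pd (r.1, yv.1))).sum
           = ((r.2.map (fun yv => (r.1, yv.1))).map (pvCf pd)).sum := by
        rw [List.map_map]; rfl
      simp only [List.map_map] at this ⊢
      rw [this]; ring

lemma A_eq (pd : List (Int × List (Int × Bool))) :
    process_fill pd = ((pvCells pd).length : Int) * ((pvCells pd).map (pvCf pd)).sum := by
  show (pd.foldl _ ((0 : Int), (0 : Int))).1 * (pd.foldl _ ((0 : Int), (0 : Int))).2 = _
  rw [A_outer_fold pd pd 0 0]
  simp

lemma mem_fst_of_mem_pvCells (l : List (Int × List (Int × Bool))) (x y : Int)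
    (h : (x, y) ∈ pvCells l) : x ∈ l.map (·.1) := by
  obtain ⟨r, hr, hrx, -⟩ := (mem_pvCells l x y).mp h
  exact List.mem_map.mpr ⟨r, hr, hrx⟩

lemma nodup_pvCells (pd : List (Int × List (Int × Bool)))
    (h1 : (pd.map (·.1)).Nodup) (h2 : ∀ r ∈ pd, (r.2.map (·.1)).Nodup) :
    (pvCells pd).Nodup := by
  induction pd with
  | nil => simp [pvCells]
  | cons r rest ih =>
    simp only [List.map_cons, List.nodup_cons] at h1
    have hc : pvCells (r :: rest) = r.2.map (fun yv => (r.1, yv.1)) ++ pvCells rest := by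
      simp [pvCells]
    rw [hc]
    refine List.Nodup.append ?_ (ih h1.2 (fun s hs => h2 s (List.mem_cons_of_mem r hs))) ?_
    · have : r.2.map (fun yv => (r.1, yv.1)) = (r.2.map (·.1)).map (fun y => (r.1, y)) := by
        rw [List.map_map]; rfl
      rw [this]
      exact (h2 r List.mem_cons_self).map (fun a b h => by simpa using h)
    · intro p hp hp'
      obtain ⟨yv, hyv, hpe⟩ := List.mem_map.mp hp
      have hx1 : p.1 = r.1 := by rw [← hpe]
      have := mem_fst_of_mem_pvCells rest p.1 p.2 (by cases p; exact hp')
      rw [hx1] at this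
      exact h1.1 this

lemma pvTcells_eq_pvCells (pd : List (Int × List (Int × Bool))) :
    pvTcells pd = pvCells (pd.map (fun r => (r.1, r.2.filter (fun yv => yv.2)))) := by
  simp [pvTcells, pvCells, List.flatMap_map]

lemma nodup_pvTcells (pd : List (Int × List (Int × Bool)))
    (h1 : (pd.map (·.1)).Nodup) (h2 : ∀ r ∈ pd, (r.2.map (·.1)).Nodup) :
    (pvTcells pd).Nodup := by
  rw [pvTcells_eq_pvCells]
  apply nodup_pvCells
  · simpa [List.map_map] using h1
  · intro s hs
    obtain ⟨r, hr, hre⟩ := List.mem_map.mp hs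
    have : (s.2.map (·.1)).Sublist (r.2.map (·.1)) := by
      rw [← hre]
      exact (List.filter_sublist).map _
    exact (h2 r hr).sublist this

-- double counting: translations are bijections between adjacent pairs
lemma exch (C T : List (Int × Int)) (hC : C.Nodup) (hT : T.Nodup) (dx dy : Int) :
    (C.map (fun p => if (p.1 + dx, p.2 + dy) ∈ T then (1 : Int) else 0)).sum
      = (T.map (fun q => if (q.1 - dx, q.2 - dy) ∈ C then (1 : Int) else 0)).sum := by
  have hL : (C.map (fun p => if (p.1 + dx, p.2 + dy) ∈ T then (1 : Int) else 0)).sum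
      = ((C.countP (fun p => decide ((p.1 + dx, p.2 + dy) ∈ T))) : Int) := by
    rw [← PySem.List.sum_map_ite_one_zero]
    exact congrArg _ (List.map_congr_left (fun a _ => by simp))
  have hR : (T.map (fun q => if (q.1 - dx, q.2 - dy) ∈ C then (1 : Int) else 0)).sum
      = ((T.countP (fun q => decide ((q.1 - dx, q.2 - dy) ∈ C))) : Int) := by
    rw [← PySem.List.sum_map_ite_one_zero]
    exact congrArg _ (List.map_congr_left (fun a _ => by simp))
  rw [hL, hR]
  congr 1
  rw [List.countP_eq_length_filter, List.countP_eq_length_filter]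
  have hinj : Function.Injective (fun p : Int × Int => (p.1 + dx, p.2 + dy)) := by
    intro a b h
    cases a; cases b
    simp only [Prod.mk.injEq] at h ⊢
    omega
  have hperm : ((C.filter (fun p => decide ((p.1 + dx, p.2 + dy) ∈ T))).map
        (fun p => (p.1 + dx, p.2 + dy))).Perm
      (T.filter (fun q => decide ((q.1 - dx, q.2 - dy) ∈ C))) := by
    rw [List.perm_ext_iff_of_nodup ((hC.filter _).map hinj) (hT.filter _)]
    intro q
    simp only [List.mem_map, List.mem_filter, decide_eq_true_eq]
    constructor
    · rintro ⟨p, ⟨hpC, hpT⟩, hq⟩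
      refine ⟨by rw [← hq]; exact hpT, ?_⟩
      have h1 : q.1 - dx = p.1 := by rw [← hq]; simp
      have h2 : q.2 - dy = p.2 := by rw [← hq]; simp
      rw [h1, h2]
      cases p; exact hpC
    · rintro ⟨hqT, hqC⟩
      refine ⟨(q.1 - dx, q.2 - dy), ⟨hqC, ?_⟩, ?_⟩
      · have : (q.1 - dx + dx, q.2 - dy + dy) = q := by cases q; simp only [Prod.mk.injEq]; omega
        rw [this]; exact hqT
      · cases q; simp only [Prod.mk.injEq]; omega
  have := hperm.length_eq
  rw [List.length_map] at this
  exact this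

def pvIndA (pd : List (Int × List (Int × Bool))) (p : Int × Int) : Int :=
  (if (p.1 - 1, p.2) ∈ pvTcells pd then 1 else 0)
  + (if (p.1 + 1, p.2) ∈ pvTcells pd then 1 else 0)
  + (if (p.1, p.2 - 1) ∈ pvTcells pd then 1 else 0)
  + (if (p.1, p.2 + 1) ∈ pvTcells pd then 1 else 0)

def pvIndB (pd : List (Int × List (Int × Bool))) (q : Int × Int) : Int :=
  (if (q.1 - 1, q.2) ∈ pvCells pd then 1 else 0)
  + (if (q.1 + 1, q.2) ∈ pvCells pd then 1 else 0)
  + (if (q.1, q.2 - 1) ∈ pvCells pd then 1 else 0)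
  + (if (q.1, q.2 + 1) ∈ pvCells pd then 1 else 0)

lemma sum4 {α : Type} (L : List α) (f1 f2 f3 f4 : α → Int) :
    (L.map (fun a => f1 a + f2 a + f3 a + f4 a)).sum
      = (L.map f1).sum + (L.map f2).sum + (L.map f3).sum + (L.map f4).sum := by
  rw [PySem.List.sum_map_add_int L (fun a => f1 a + f2 a + f3 a) f4,
      PySem.List.sum_map_add_int L (fun a => f1 a + f2 a) f3,
      PySem.List.sum_map_add_int L f1 f2]

lemma dir_sum (pd : List (Int × List (Int × Bool)))
    (h1 : (pd.map (·.1)).Nodup) (h2 : ∀ r ∈ pd, (r.2.map (·.1)).Nodup) (x y : Int) :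
    (if !(pvTruthy (pvGet2 pd x y)) then (1 : Int) else 0)
      + (if (x, y) ∈ pvTcells pd then (1 : Int) else 0) = 1 := by
  by_cases hm : (x, y) ∈ pvTcells pd
  · have hb : pvTruthy (pvGet2 pd x y) = true :=
      (pvTruthy_eq_true_iff _).mpr ((pvGet2_some_true_iff pd h1 h2 x y).mpr hm)
    simp [hb, hm]
  · have hb : pvTruthy (pvGet2 pd x y) = false := by
      cases hc : pvTruthy (pvGet2 pd x y)
      · rfl
      · exact absurd ((pvGet2_some_true_iff pd h1 h2 x y).mp ((pvTruthy_eq_true_iff _).mp hc)) hm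
    simp [hb, hm]

lemma cf_add_indA (pd : List (Int × List (Int × Bool)))
    (h1 : (pd.map (·.1)).Nodup) (h2 : ∀ r ∈ pd, (r.2.map (·.1)).Nodup) (p : Int × Int) :
    pvCf pd p + pvIndA pd p = 4 := by
  have e1 := dir_sum pd h1 h2 (p.1 - 1) p.2
  have e2 := dir_sum pd h1 h2 (p.1 + 1) p.2
  have e3 := dir_sum pd h1 h2 p.1 (p.2 - 1)
  have e4 := dir_sum pd h1 h2 p.1 (p.2 + 1)
  unfold pvCf pvIndA
  linarith [e1, e2, e3, e4]

lemma A_fence (pd : List (Int × List (Int × Bool)))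
    (h1 : (pd.map (·.1)).Nodup) (h2 : ∀ r ∈ pd, (r.2.map (·.1)).Nodup) :
    ((pvCells pd).map (pvCf pd)).sum
      = ((pvCells pd).length : Int) * 4 - ((pvCells pd).map (pvIndA pd)).sum := by
  have h : ((pvCells pd).map (fun p => pvCf pd p + pvIndA pd p)).sum
      = ((pvCells pd).length : Int) * 4 := by
    have : (fun p => pvCf pd p + pvIndA pd p) = (fun _ : Int × Int => (4 : Int)) :=
      funext (cf_add_indA pd h1 h2)
    rw [this, PySem.List.sum_map_const_int]
  rw [PySem.List.sum_map_add_int] at h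
  linarith [h]

lemma exchange_total (pd : List (Int × List (Int × Bool)))
    (h1 : (pd.map (·.1)).Nodup) (h2 : ∀ r ∈ pd, (r.2.map (·.1)).Nodup) :
    ((pvCells pd).map (pvIndA pd)).sum = ((pvTcells pd).map (pvIndB pd)).sum := by
  have hC := nodup_pvCells pd h1 h2
  have hT := nodup_pvTcells pd h1 h2
  set C := pvCells pd with hCdef
  set T := pvTcells pd with hTdef
  have d1 : (C.map (fun p => if (p.1 - 1, p.2) ∈ T then (1 : Int) else 0)).sum
      = (T.map (fun q => if (q.1 + 1, q.2) ∈ C then (1 : Int) else 0)).sum := by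
    have e : (fun p : Int × Int => if (p.1 - 1, p.2) ∈ T then (1 : Int) else 0)
        = fun p => if (p.1 + (-1), p.2 + 0) ∈ T then (1 : Int) else 0 := by
      funext p; norm_num [sub_eq_add_neg]
    have e' : (fun q : Int × Int => if (q.1 - (-1), q.2 - 0) ∈ C then (1 : Int) else 0)
        = fun q => if (q.1 + 1, q.2) ∈ C then (1 : Int) else 0 := by
      funext q; norm_num
    rw [e, exch C T hC hT (-1) 0, e']
  have d2 : (C.map (fun p => if (p.1 + 1, p.2) ∈ T then (1 : Int) else 0)).sum
      = (T.map (fun q => if (q.1 - 1, q.2) ∈ C then (1 : Int) else 0)).sum := by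
    have e : (fun p : Int × Int => if (p.1 + 1, p.2) ∈ T then (1 : Int) else 0)
        = fun p => if (p.1 + 1, p.2 + 0) ∈ T then (1 : Int) else 0 := by
      funext p; norm_num
    have e' : (fun q : Int × Int => if (q.1 - 1, q.2 - 0) ∈ C then (1 : Int) else 0)
        = fun q => if (q.1 - 1, q.2) ∈ C then (1 : Int) else 0 := by
      funext q; norm_num
    rw [e, exch C T hC hT 1 0, e']
  have d3 : (C.map (fun p => if (p.1, p.2 - 1) ∈ T then (1 : Int) else 0)).sum
      = (T.map (fun q => if (q.1, q.2 + 1) ∈ C then (1 : Int) else 0)).sum := by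
    have e : (fun p : Int × Int => if (p.1, p.2 - 1) ∈ T then (1 : Int) else 0)
        = fun p => if (p.1 + 0, p.2 + (-1)) ∈ T then (1 : Int) else 0 := by
      funext p; norm_num [sub_eq_add_neg]
    have e' : (fun q : Int × Int => if (q.1 - 0, q.2 - (-1)) ∈ C then (1 : Int) else 0)
        = fun q => if (q.1, q.2 + 1) ∈ C then (1 : Int) else 0 := by
      funext q; norm_num
    rw [e, exch C T hC hT 0 (-1), e']
  have d4 : (C.map (fun p => if (p.1, p.2 + 1) ∈ T then (1 : Int) else 0)).sum
      = (T.map (fun q => if (q.1, q.2 - 1) ∈ C then (1 : Int) else 0)).sum := by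
    have e : (fun p : Int × Int => if (p.1, p.2 + 1) ∈ T then (1 : Int) else 0)
        = fun p => if (p.1 + 0, p.2 + 1) ∈ T then (1 : Int) else 0 := by
      funext p; norm_num
    have e' : (fun q : Int × Int => if (q.1 - 0, q.2 - 1) ∈ C then (1 : Int) else 0)
        = fun q => if (q.1, q.2 - 1) ∈ C then (1 : Int) else 0 := by
      funext q; norm_num
    rw [e, exch C T hC hT 0 1, e']
  unfold pvIndA pvIndB
  rw [sum4, sum4, d1, d2, d3, d4]
  ring

lemma B_area (pd : List (Int × List (Int × Bool))) :
    (pd.map (fun r => (r.2.length : Int))).sum = ((pvCells pd).length : Int) := by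
  induction pd with
  | nil => simp [pvCells]
  | cons r rest ih =>
    have hc : pvCells (r :: rest) = r.2.map (fun yv => (r.1, yv.1)) ++ pvCells rest := by
      simp [pvCells]
    rw [List.map_cons, List.sum_cons, ih, hc]
    simp only [List.length_append, List.length_map]
    push_cast
    ring

lemma B_eq (pd : List (Int × List (Int × Bool)))
    (h1 : (pd.map (·.1)).Nodup) (h2 : ∀ r ∈ pd, (r.2.map (·.1)).Nodup) :
    process_fill_alt pd = ((pvCells pd).length : Int)
      * (4 * ((pvCells pd).length : Int) - ((pvTcells pd).map (pvIndB pd)).sum) := by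
  simp only [process_fill_alt]
  rw [B_area pd]
  congr 1
  congr 1
  have hofC : PySem.Set.ofList (pd.flatMap (fun r => r.2.map (fun yv => (r.1, yv.1))))
      = PySem.Set.ofList (pvCells pd) := rfl
  have hofT : PySem.Set.ofList
        (pd.flatMap (fun r => (r.2.filter (fun yv => yv.2)).map (fun yv => (r.1, yv.1))))
      = pvTcells pd := by
    rw [show pd.flatMap (fun r => (r.2.filter (fun yv => yv.2)).map (fun yv => (r.1, yv.1)))
        = pvTcells pd from rfl]
    exact PySem.Set.ofList_eq_self_of_nodup _ (nodup_pvTcells pd h1 h2)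
  rw [hofC, hofT]
  have hfn : (fun (acc : Int) (q : Int × Int) =>
        acc + (if (q.1 - 1, q.2) ∈ PySem.Set.ofList (pvCells pd) then (1:Int) else 0)
            + (if (q.1 + 1, q.2) ∈ PySem.Set.ofList (pvCells pd) then (1:Int) else 0)
            + (if (q.1, q.2 - 1) ∈ PySem.Set.ofList (pvCells pd) then (1:Int) else 0)
            + (if (q.1, q.2 + 1) ∈ PySem.Set.ofList (pvCells pd) then (1:Int) else 0))
      = fun acc q => acc +
            ((if (q.1 - 1, q.2) ∈ PySem.Set.ofList (pvCells pd) then (1:Int) else 0)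
            + (if (q.1 + 1, q.2) ∈ PySem.Set.ofList (pvCells pd) then (1:Int) else 0)
            + (if (q.1, q.2 - 1) ∈ PySem.Set.ofList (pvCells pd) then (1:Int) else 0)
            + (if (q.1, q.2 + 1) ∈ PySem.Set.ofList (pvCells pd) then (1:Int) else 0)) := by
    funext acc q; ring
  rw [hfn, PySem.List.foldl_add]
  rw [zero_add]
  apply congrArg
  apply List.map_congr_left
  intro q _
  simp [pvIndB, PySem.Set.mem_ofList]

lemma AB_eq (pd : List (Int × List (Int × Bool)))
    (h1 : (pd.map (·.1)).Nodup) (h2 : ∀ r ∈ pd, (r.2.map (·.1)).Nodup) :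
    process_fill pd = process_fill_alt pd := by
  rw [A_eq pd, B_eq pd h1 h2, A_fence pd h1 h2, exchange_total pd h1 h2]
  ring

-- ===== VERDICT (by name: the statement is the Claim_ definition above) =====
theorem process_fill_spec : Claim_equal_process_fill := by
  intro pd _ hpre
  show process_fill pd = process_fill_alt pd
  exact AB_eq pd hpre.1 hpre.2
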